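-- pv_equiv track=rewrite | github.com/15hours/grind | graph/695.py | _bfs_approach
-- ===== SOURCE A (Python) =====
-- import collections
--
-- def _bfs_approach(grid: list[list[int]]) -> int:
--     num_rows = len(grid)
--     num_cols = len(grid[0])
--
--     def bfs(start_node: int) -> int:
--         queue = collections.deque()
--         land_count = 1
--
--         queue.append(start_node)
--
--         while queue:
--             i, j = queue.popleft()
--
--             for next_i, next_j in [(i - 1, j), (i, j - 1),
--                                    (i + 1, j), (i, j + 1)]:
--                 if not (0 <= next_i < num_rows and \
--                         0 <= next_j < num_cols and \
--                         grid[next_i][next_j] == 1):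
--                     continue
--
--                 grid[next_i][next_j] = "+"
--                 queue.append([next_i, next_j])
--                 land_count += 1
--
--         return land_count
--
--     max_area = 0
--     for i in range(num_rows):
--         for j in range(num_cols):
--             if grid[i][j] == 1:
--                 grid[i][j] = "+"
--                 area = bfs([i, j])
--                 max_area = max(max_area, area)
--
--     return max_area
-- ===== SOURCE B (Python) =====
-- def _bfs_approach(grid: list[list[int]]) -> int:
--     num_rows = len(grid)
--     num_cols = len(grid[0])
--
--     def dfs(i: int, j: int) -> int:
--         # (i, j) is already marked; recursively absorb its land neighbours.
--         area = 1
--         for ni, nj in ((i - 1, j), (i, j - 1), (i + 1, j), (i, j + 1)):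
--             if 0 <= ni < num_rows and 0 <= nj < num_cols and grid[ni][nj] == 1:
--                 grid[ni][nj] = "+"
--                 area += dfs(ni, nj)
--         return area
--
--     max_area = 0
--     for i in range(num_rows):
--         for j in range(num_cols):
--             if grid[i][j] == 1:
--                 grid[i][j] = "+"
--                 max_area = max(max_area, dfs(i, j))
--     return max_area
-- ===== Notes on version B (the rewrite author's own statement) =====
-- stated objective: alternative
-- what changed: Replaces the explicit BFS queue loop (pop-left, inner neighbour loop, append, land_count accumulator) by a recursive depth-first flood fill whose helper returns 1 plus the recursively computed areas of the valid neighbours; no queue, no counter threading - the area is composed on the way back up the recursion.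
import Mathlib
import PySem

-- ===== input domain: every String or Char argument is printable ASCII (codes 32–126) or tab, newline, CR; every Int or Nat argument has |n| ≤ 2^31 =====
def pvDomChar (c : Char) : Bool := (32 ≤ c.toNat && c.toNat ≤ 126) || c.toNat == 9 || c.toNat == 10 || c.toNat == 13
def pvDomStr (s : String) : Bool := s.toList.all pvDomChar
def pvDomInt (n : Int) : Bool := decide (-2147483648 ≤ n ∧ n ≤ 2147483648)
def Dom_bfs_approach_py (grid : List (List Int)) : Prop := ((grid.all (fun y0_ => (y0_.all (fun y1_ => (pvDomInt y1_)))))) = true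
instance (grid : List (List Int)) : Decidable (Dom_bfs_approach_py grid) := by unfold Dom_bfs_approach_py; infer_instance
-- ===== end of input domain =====

-- B replaces A's explicit BFS queue (pop-left, inner neighbour loop, mark-and-append,
-- land_count accumulator) by a recursive depth-first flood fill whose helper returns
-- 1 plus the recursively computed areas of the four valid neighbours (objective:
-- alternative, same asymptotic cost).
-- Both Pythons mutate `grid` in place identically (island cells become "+"); the Lean
-- ports model the "+" marker by the Int 2 — the programs only ever test cells for == 1,
-- so any non-1 marker is observationally identical for both the result and every test.

-- Shared primitive helpers (the ports read/write single cells through these).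
-- cellAt g x y = Python grid[x][y] read, total form (call sites guard 0 ≤ x < len etc.).
def cellAt (g : List (List Int)) (x y : Int) : Int :=
  PySem.List.pyGetD (PySem.List.pyGetD g x []) y 0

-- setCell g x y = Python grid[x][y] = "+" (marker modelled by 2), total form.
def setCell (g : List (List Int)) (x y : Int) : List (List Int) :=
  PySem.List.pySetD g x (PySem.List.pySetD (PySem.List.pyGetD g x []) y 2)

-- number of 1-cells; termination measure only (not part of either computation)
def onesG (g : List (List Int)) : Nat := (g.map (fun r => r.count 1)).sum

theorem count_set_lt (r : List Int) :
    ∀ j : Nat, r[j]? = some 1 → (r.set j 2).count 1 < r.count 1 := by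
  induction r with
  | nil => intro j h; simp at h
  | cons a rs ih =>
    intro j h
    cases j with
    | zero => simp at h; subst h; simp
    | succ j =>
      simp at h
      have := ih j h
      simp [List.count_cons]
      omega

theorem onesG_set_lt (g : List (List Int)) :
    ∀ (i : Nat) (r r' : List Int), g[i]? = some r → r'.count 1 < r.count 1 →
      onesG (g.set i r') < onesG g := by
  induction g with
  | nil => intro i r r' h; simp at h
  | cons a gs ih =>
    intro i r r' h hlt
    cases i with
    | zero => simp at h; subst h; simp [onesG]; omega
    | succ i =>
      simp at h
      have := ih i r r' h hlt
      simp [onesG] at *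
      omega

theorem pyGetD_toNat {α} (xs : List α) (i : Int) (d : α) (h : 0 ≤ i) :
    PySem.List.pyGetD xs i d = (xs[i.toNat]?).getD d := by
  simp [PySem.List.pyGetD, PySem.List.pyGet?_of_nonneg xs h]

theorem cellAt_eq (g : List (List Int)) (x y : Int) (hx : 0 ≤ x) (hy : 0 ≤ y) :
    cellAt g x y = ((((g[x.toNat]?).getD [])[y.toNat]?).getD 0) := by
  simp [cellAt, pyGetD_toNat _ _ _ hx, pyGetD_toNat _ _ _ hy]

theorem setCell_eq (g : List (List Int)) (x y : Int) (hx : 0 ≤ x) (hy : 0 ≤ y) :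
    setCell g x y = g.set x.toNat (((g[x.toNat]?).getD []).set y.toNat 2) := by
  simp [setCell, pyGetD_toNat _ _ _ hx, PySem.List.pySetD_of_nonneg _ _ hx,
        PySem.List.pySetD_of_nonneg _ _ hy]

-- a read of 1 pins down a real position
theorem cellAt_one_spec (g : List (List Int)) (x y : Int) (hx : 0 ≤ x) (hy : 0 ≤ y)
    (h1 : cellAt g x y = 1) :
    ∃ r, g[x.toNat]? = some r ∧ r[y.toNat]? = some 1 := by
  rw [cellAt_eq g x y hx hy] at h1
  cases hgi : g[x.toNat]? with
  | none => rw [hgi] at h1; simp at h1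
  | some r =>
    rw [hgi] at h1
    cases hrj : r[y.toNat]? with
    | none => simp [hrj] at h1
    | some v => simp [hrj] at h1; exact ⟨r, rfl, by rw [h1] at hrj; exact hrj⟩

theorem ones_setCell_lt (g : List (List Int)) (x y : Int) (hx : 0 ≤ x) (hy : 0 ≤ y)
    (h1 : cellAt g x y = 1) : onesG (setCell g x y) < onesG g := by
  obtain ⟨r, hgi, hrj⟩ := cellAt_one_spec g x y hx hy h1
  rw [setCell_eq g x y hx hy, hgi]
  exact onesG_set_lt g x.toNat r _ hgi (count_set_lt r y.toNat hrj)

-- ===== PORT A =====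
-- Port of A (`_bfs_approach`): BFS with an explicit queue; each popped cell's four
-- neighbours are validated eagerly, marked and appended.  `num_cols = len(grid[0])`
-- raises IndexError on [] in Python; the total port reads the row with default []
-- (Pre_ excludes that input).  land_count/max are threaded exactly as in the Python.
def bfsStep (nr nc : Int) (acc : List (List Int) × List (Int × Int) × Int)
    (nb : Int × Int) : List (List Int) × List (Int × Int) × Int :=
  match acc, nb with
  | (g, q, cnt), (x, y) =>
    if 0 ≤ x ∧ x < nr ∧ 0 ≤ y ∧ y < nc ∧ cellAt g x y = 1 then
      (setCell g x y, q ++ [(x, y)], cnt + 1)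
    else (g, q, cnt)

theorem bfsFold_le (nr nc : Int) (ns : List (Int × Int)) :
    ∀ (g : List (List Int)) (q : List (Int × Int)) (cnt : Int),
      5 * onesG (List.foldl (bfsStep nr nc) (g, q, cnt) ns).1 +
        (List.foldl (bfsStep nr nc) (g, q, cnt) ns).2.1.length ≤
      5 * onesG g + q.length := by
  induction ns with
  | nil => intro g q cnt; simp
  | cons c ns ih =>
    intro g q cnt
    obtain ⟨x, y⟩ := c
    by_cases h : 0 ≤ x ∧ x < nr ∧ 0 ≤ y ∧ y < nc ∧ cellAt g x y = 1
    · have hlt := ones_setCell_lt g x y h.1 h.2.2.1 h.2.2.2.2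
      have := ih (setCell g x y) (q ++ [(x, y)]) (cnt + 1)
      simp only [List.foldl_cons, bfsStep, if_pos h]
      simp at this ⊢
      omega
    · have := ih g q cnt
      simp only [List.foldl_cons, bfsStep, if_neg h]
      omega

theorem bfs_dec (nr nc : Int) (g : List (List Int)) (i j : Int)
    (rest : List (Int × Int)) (cnt : Int) :
    5 * onesG (List.foldl (bfsStep nr nc) (g, rest, cnt)
        [(i - 1, j), (i, j - 1), (i + 1, j), (i, j + 1)]).1 +
      (List.foldl (bfsStep nr nc) (g, rest, cnt)
        [(i - 1, j), (i, j - 1), (i + 1, j), (i, j + 1)]).2.1.length <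
    5 * onesG g + ((i, j) :: rest).length := by
  have h := bfsFold_le nr nc [(i - 1, j), (i, j - 1), (i + 1, j), (i, j + 1)] g rest cnt
  simp only [List.length_cons] at *
  omega

-- the `while queue:` loop of bfs
def bfsLoop (nr nc : Int) (g : List (List Int)) (q : List (Int × Int)) (cnt : Int) :
    List (List Int) × Int :=
  match q with
  | [] => (g, cnt)
  | (i, j) :: rest =>
    let s := List.foldl (bfsStep nr nc) (g, rest, cnt)
      [(i - 1, j), (i, j - 1), (i + 1, j), (i, j + 1)]
    bfsLoop nr nc s.1 s.2.1 s.2.2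
termination_by 5 * onesG g + q.length
decreasing_by
  exact bfs_dec nr nc g i j rest cnt

def bfs_approach_py (grid : List (List Int)) : Int :=
  let numRows : Int := grid.length
  let numCols : Int := (PySem.List.pyGetD grid 0 []).length
  (List.foldl (fun (st : List (List Int) × Int) (i : Int) =>
      List.foldl (fun (st : List (List Int) × Int) (j : Int) =>
          if cellAt st.1 i j = 1 then
            let g1 := setCell st.1 i j
            let p := bfsLoop numRows numCols g1 [(i, j)] 1
            (p.1, max st.2 p.2)
          else st)
        st (PySem.List.pyRange 0 numCols 1))
    (grid, 0) (PySem.List.pyRange 0 numRows 1)).2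

-- ===== PORT B =====
-- Port of B: the recursive depth-first flood fill.  `dfs(i, j)` walks the literal
-- 4-tuple of neighbour candidates in order; a valid land neighbour is marked and
-- recursed into, its area added on return.  The Lean `dfsS` is that recursion with the
-- neighbour tuple made the structural argument; it returns the mutated grid together
-- with the SUM of the neighbour areas (Python's `area - 1`), and carries the invariant
-- `onesG p.1 ≤ onesG g` in a subtype purely so the well-founded recursion that models
-- Python's call stack can be stated (the computed values are exactly the Python ones).

-- the four neighbour candidates of a cell, in B's (and A's) order
def nbsL (c : Int × Int) : List (Int × Int) :=
  [(c.1 - 1, c.2), (c.1, c.2 - 1), (c.1 + 1, c.2), (c.1, c.2 + 1)]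

-- termination/invariant lemmas for dfsS (named so the recursion cites them compactly)
theorem dfs_bound (g gs gp gq : List (List Int))
    (h1 : onesG gs < onesG g) (hp : onesG gp ≤ onesG gs) (hq : onesG gq ≤ onesG gp) :
    onesG gq ≤ onesG g :=
  le_trans hq (le_trans hp (Nat.le_of_lt h1))

theorem dfs_dec1 (nr nc : Int) (g : List (List Int)) (c : Int × Int)
    (rest : List (Int × Int))
    (h : 0 ≤ c.1 ∧ c.1 < nr ∧ 0 ≤ c.2 ∧ c.2 < nc ∧ cellAt g c.1 c.2 = 1) :
    5 * onesG (setCell g c.1 c.2) + (nbsL c).length < 5 * onesG g + (c :: rest).length := by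
  have := ones_setCell_lt g c.1 c.2 h.1 h.2.2.1 h.2.2.2.2
  simp only [nbsL, List.length_cons, List.length_nil]
  omega

theorem dfs_dec2 (nr nc : Int) (g gp : List (List Int)) (c : Int × Int)
    (rest : List (Int × Int))
    (h : 0 ≤ c.1 ∧ c.1 < nr ∧ 0 ≤ c.2 ∧ c.2 < nc ∧ cellAt g c.1 c.2 = 1)
    (hp : onesG gp ≤ onesG (setCell g c.1 c.2)) :
    5 * onesG gp + rest.length < 5 * onesG g + (c :: rest).length := by
  have := ones_setCell_lt g c.1 c.2 h.1 h.2.2.1 h.2.2.2.2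
  simp only [List.length_cons]
  omega

theorem dfs_dec3 (g : List (List Int)) (c : Int × Int) (rest : List (Int × Int)) :
    5 * onesG g + rest.length < 5 * onesG g + (c :: rest).length := by
  simp

def dfsS (nr nc : Int) (g : List (List Int)) (nbs : List (Int × Int)) :
    {p : List (List Int) × Int // onesG p.1 ≤ onesG g} :=
  match nbs with
  | [] => ⟨(g, 0), le_rfl⟩
  | c :: rest =>
    if h : 0 ≤ c.1 ∧ c.1 < nr ∧ 0 ≤ c.2 ∧ c.2 < nc ∧ cellAt g c.1 c.2 = 1 then
      -- grid[ni][nj] = "+"; area += dfs(ni, nj)  (dfs(ni,nj) = 1 + sum of its neighbours)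
      let p := dfsS nr nc (setCell g c.1 c.2) (nbsL c)
      let q := dfsS nr nc p.val.1 rest
      ⟨(q.val.1, (1 + p.val.2) + q.val.2),
        dfs_bound g (setCell g c.1 c.2) p.val.1 q.val.1
          (ones_setCell_lt g c.1 c.2 h.1 h.2.2.1 h.2.2.2.2) p.property q.property⟩
    else
      let q := dfsS nr nc g rest
      ⟨q.val, q.property⟩
termination_by 5 * onesG g + nbs.length
decreasing_by
  · exact dfs_dec1 nr nc g c rest h
  · exact dfs_dec2 nr nc g p.val.1 c rest h p.property
  · exact dfs_dec3 g c rest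

def bfs_approach_py_alt (grid : List (List Int)) : Int :=
  let numRows : Int := grid.length
  let numCols : Int := (PySem.List.pyGetD grid 0 []).length
  (List.foldl (fun (st : List (List Int) × Int) (i : Int) =>
      List.foldl (fun (st : List (List Int) × Int) (j : Int) =>
          if cellAt st.1 i j = 1 then
            let p := dfsS numRows numCols (setCell st.1 i j) (nbsL (i, j))
            (p.val.1, max st.2 (1 + p.val.2))
          else st)
        st (PySem.List.pyRange 0 numCols 1))
    (grid, 0) (PySem.List.pyRange 0 numRows 1)).2

-- ===== PRECONDITION & SPEC =====
-- Pre_ excludes exactly the inputs where the Python A raises: the empty grid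
-- (len(grid[0]) is an IndexError) and grids with a row shorter than row 0 (the outer
-- loop reads grid[i][j] for every j < len(grid[0]), an IndexError on such a row).
def Pre_bfs_approach_py (grid : List (List Int)) : Prop :=
  grid ≠ [] ∧ ∀ r ∈ grid, (PySem.List.pyGetD grid 0 []).length ≤ r.length
instance (grid : List (List Int)) : Decidable (Pre_bfs_approach_py grid) := by
  unfold Pre_bfs_approach_py; infer_instance

def pvWitness_bfs_approach_py : List (List Int) := ([[1, 1, 0], [0, 1, 0]])

def Spec_bfs_approach_py (grid : List (List Int)) (out : Int) : Prop := out = bfs_approach_py_alt grid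
instance (grid : List (List Int)) (out : Int) : Decidable (Spec_bfs_approach_py grid out) := by unfold Spec_bfs_approach_py; infer_instance

-- ===== CLAIM (what is proved, stated in full; the proofs are below) =====
def Claim_equal_bfs_approach_py : Prop := ∀ (grid : List (List Int)), Dom_bfs_approach_py grid → Pre_bfs_approach_py grid → Spec_bfs_approach_py grid (bfs_approach_py grid)

-- ===== LEMMAS AND PROOFS =====

-- the validity guard both programs test
abbrev VG (nr nc : Int) (g : List (List Int)) (c : Int × Int) : Prop :=
  0 ≤ c.1 ∧ c.1 < nr ∧ 0 ≤ c.2 ∧ c.2 < nc ∧ cellAt g c.1 c.2 = 1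

theorem nbsL_length (c : Int × Int) : (nbsL c).length = 4 := rfl

-- proof-side common form: a LIFO worklist flood fill; A's BFS and B's DFS recursion
-- are both reduced to it (in different todo orders), and fill_perm closes the gap.
def fillB (nr nc : Int) (g : List (List Int)) (area : Int) (todo : List (Int × Int)) :
    List (List Int) × Int :=
  match todo with
  | [] => (g, area)
  | (x, y) :: rest =>
    if 0 ≤ x ∧ x < nr ∧ 0 ≤ y ∧ y < nc ∧ cellAt g x y = 1 then
      fillB nr nc (setCell g x y) (area + 1)
        ((x - 1, y) :: (x, y - 1) :: (x + 1, y) :: (x, y + 1) :: rest)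
    else fillB nr nc g area rest
termination_by 5 * onesG g + todo.length
decreasing_by
  · have := ones_setCell_lt g x y (by tauto) (by tauto) (by tauto)
    simp; omega
  · simp

theorem fillB_cons (nr nc : Int) (g : List (List Int)) (n : Int) (c : Int × Int)
    (rest : List (Int × Int)) :
    fillB nr nc g n (c :: rest) =
      if VG nr nc g c then fillB nr nc (setCell g c.1 c.2) (n + 1) (nbsL c ++ rest)
      else fillB nr nc g n rest := by
  obtain ⟨x, y⟩ := c
  rw [fillB]
  rfl

theorem dfsS_cons (nr nc : Int) (g : List (List Int)) (c : Int × Int)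
    (rest : List (Int × Int)) :
    (dfsS nr nc g (c :: rest)).val =
      if VG nr nc g c then
        ((dfsS nr nc (dfsS nr nc (setCell g c.1 c.2) (nbsL c)).val.1 rest).val.1,
         (1 + (dfsS nr nc (setCell g c.1 c.2) (nbsL c)).val.2) +
           (dfsS nr nc (dfsS nr nc (setCell g c.1 c.2) (nbsL c)).val.1 rest).val.2)
      else (dfsS nr nc g rest).val := by
  rw [dfsS]
  by_cases h : VG nr nc g c
  · simp [h]
  · simp [h]

theorem bfsStep_eq (nr nc : Int) (g : List (List Int)) (q : List (Int × Int)) (cnt : Int)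
    (c : Int × Int) :
    bfsStep nr nc (g, q, cnt) c =
      if VG nr nc g c then (setCell g c.1 c.2, q ++ [c], cnt + 1) else (g, q, cnt) := by
  obtain ⟨x, y⟩ := c
  rfl

-- marking one valid cell preserves the guard at every other cell and kills it at its own
theorem cellAt_setCell_ne (g : List (List Int)) (x y x' y' : Int) (hx : 0 ≤ x) (hy : 0 ≤ y)
    (h1 : cellAt g x y = 1) (hx' : 0 ≤ x') (hy' : 0 ≤ y') (hne : ¬(x = x' ∧ y = y')) :
    cellAt (setCell g x y) x' y' = cellAt g x' y' := by
  obtain ⟨r, hgi, hrj⟩ := cellAt_one_spec g x y hx hy h1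
  have hi : x.toNat < g.length := List.getElem?_eq_some_iff.mp hgi |>.1
  rw [setCell_eq g x y hx hy, cellAt_eq _ x' y' hx' hy', cellAt_eq g x' y' hx' hy']
  by_cases hxx : x.toNat = x'.toNat
  · have : x = x' := by omega
    have hyy : y.toNat ≠ y'.toNat := by
      have : y ≠ y' := fun h => hne ⟨this, h⟩
      omega
    rw [← hxx, List.getElem?_set_self hi, hgi]
    simp [List.getElem?_set_ne hyy]
  · rw [List.getElem?_set_ne hxx]

theorem cellAt_setCell_self (g : List (List Int)) (x y : Int) (hx : 0 ≤ x) (hy : 0 ≤ y)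
    (h1 : cellAt g x y = 1) : cellAt (setCell g x y) x y = 2 := by
  obtain ⟨r, hgi, hrj⟩ := cellAt_one_spec g x y hx hy h1
  have hi : x.toNat < g.length := List.getElem?_eq_some_iff.mp hgi |>.1
  have hj : y.toNat < r.length := List.getElem?_eq_some_iff.mp hrj |>.1
  rw [setCell_eq g x y hx hy, cellAt_eq _ x y hx hy, List.getElem?_set_self hi, hgi]
  simp [List.getElem?_set_self (by simpa using hj)]

theorem VG_mark (nr nc : Int) (g : List (List Int)) (a c : Int × Int)
    (ha : VG nr nc g a) (hne : c ≠ a) :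
    (VG nr nc (setCell g a.1 a.2) c ↔ VG nr nc g c) := by
  unfold VG at *
  obtain ⟨ha0, ha1, ha2, ha3, ha4⟩ := ha
  constructor
  · rintro ⟨h0, h1, h2, h3, h4⟩
    refine ⟨h0, h1, h2, h3, ?_⟩
    rwa [cellAt_setCell_ne g a.1 a.2 c.1 c.2 ha0 ha2 ha4 h0 h2
      (fun h => hne (Prod.ext h.1.symm h.2.symm))] at h4
  · rintro ⟨h0, h1, h2, h3, h4⟩
    refine ⟨h0, h1, h2, h3, ?_⟩
    rwa [cellAt_setCell_ne g a.1 a.2 c.1 c.2 ha0 ha2 ha4 h0 h2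
      (fun h => hne (Prod.ext h.1.symm h.2.symm))]

theorem VG_mark_self (nr nc : Int) (g : List (List Int)) (a : Int × Int)
    (ha : VG nr nc g a) : ¬ VG nr nc (setCell g a.1 a.2) a := by
  obtain ⟨ha0, ha1, ha2, ha3, ha4⟩ := ha
  intro h
  have := cellAt_setCell_self g a.1 a.2 ha0 ha2 ha4
  rw [h.2.2.2.2] at this
  exact absurd this (by decide)

theorem setCell_comm (g : List (List Int)) (a b : Int × Int)
    (ha0 : 0 ≤ a.1) (ha1 : 0 ≤ a.2) (hA : cellAt g a.1 a.2 = 1)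
    (hb0 : 0 ≤ b.1) (hb1 : 0 ≤ b.2) (hB : cellAt g b.1 b.2 = 1) (hne : a ≠ b) :
    setCell (setCell g a.1 a.2) b.1 b.2 = setCell (setCell g b.1 b.2) a.1 a.2 := by
  obtain ⟨ra, hga, hra⟩ := cellAt_one_spec g a.1 a.2 ha0 ha1 hA
  obtain ⟨rb, hgb, hrb⟩ := cellAt_one_spec g b.1 b.2 hb0 hb1 hB
  have hia : a.1.toNat < g.length := List.getElem?_eq_some_iff.mp hga |>.1
  have hib : b.1.toNat < g.length := List.getElem?_eq_some_iff.mp hgb |>.1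
  rw [setCell_eq g a.1 a.2 ha0 ha1, setCell_eq g b.1 b.2 hb0 hb1,
      setCell_eq _ b.1 b.2 hb0 hb1, setCell_eq _ a.1 a.2 ha0 ha1]
  by_cases hxx : a.1.toNat = b.1.toNat
  · have hx : a.1 = b.1 := by omega
    have hy : a.2 ≠ b.2 := fun h => hne (Prod.ext hx h)
    have hyy : a.2.toNat ≠ b.2.toNat := by omega
    rw [← hxx, List.getElem?_set_self hia, List.getElem?_set_self hia, hga]
    simp only [Option.getD_some, List.set_set]
    rw [List.set_comm _ _ hyy]
  · rw [List.getElem?_set_ne hxx, List.getElem?_set_ne (Ne.symm hxx),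
        List.set_comm _ _ hxx]

-- ===== the key order-independence of the worklist fill =====
-- (bring-to-front and permutation invariance, by joint strong induction on
--  5 * onesG g + todo.length)
theorem fill_main (nr nc : Int) : ∀ m : Nat,
    (∀ (g : List (List Int)) (n : Int) (l1 : List (Int × Int)) (x : Int × Int) l2,
        5 * onesG g + (l1 ++ x :: l2).length ≤ m →
        fillB nr nc g n (l1 ++ x :: l2) = fillB nr nc g n (x :: (l1 ++ l2)))
  ∧ (∀ (g : List (List Int)) (n : Int) (l l' : List (Int × Int)), l.Perm l' →
        5 * onesG g + l.length ≤ m →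
        fillB nr nc g n l = fillB nr nc g n l') := by
  intro m
  induction m using Nat.strong_induction_on with
  | _ m IH =>
  have IH1 : ∀ m', m' < m → ∀ (g : List (List Int)) (n : Int) (l1 : List (Int × Int))
      (x : Int × Int) (l2 : List (Int × Int)), 5 * onesG g + (l1 ++ x :: l2).length ≤ m' →
      fillB nr nc g n (l1 ++ x :: l2) = fillB nr nc g n (x :: (l1 ++ l2)) :=
    fun m' h => (IH m' h).1
  have IH2 : ∀ m', m' < m → ∀ (g : List (List Int)) (n : Int) (l l' : List (Int × Int)),
      l.Perm l' → 5 * onesG g + l.length ≤ m' →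
      fillB nr nc g n l = fillB nr nc g n l' :=
    fun m' h => (IH m' h).2
  have hBTF : ∀ (g : List (List Int)) (n : Int) (l1 : List (Int × Int)) (x : Int × Int) l2,
      5 * onesG g + (l1 ++ x :: l2).length ≤ m →
      fillB nr nc g n (l1 ++ x :: l2) = fillB nr nc g n (x :: (l1 ++ l2)) := by
    intro g n l1 x l2 hm
    cases l1 with
    | nil => simp
    | cons c t =>
      simp only [List.length_append, List.length_cons] at hm
      by_cases hc : VG nr nc g c
      · have hones_c : onesG (setCell g c.1 c.2) < onesG g :=
          ones_setCell_lt _ _ _ hc.1 hc.2.2.1 hc.2.2.2.2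
        rw [List.cons_append, fillB_cons, if_pos hc, ← List.append_assoc,
            IH1 (m - 1) (by omega) _ _ _ _ _
              (by simp only [List.length_append, List.length_cons, nbsL_length]; omega)]
        by_cases hxc : x = c
        · subst hxc
          rw [fillB_cons, if_neg (VG_mark_self nr nc g x hc)]
          rw [List.cons_append, fillB_cons, if_pos hc,
              IH1 (m - 1) (by omega) _ _ (nbsL x) x (t ++ l2)
                (by simp only [List.length_append, List.length_cons, nbsL_length]; omega),
              fillB_cons, if_neg (VG_mark_self nr nc g x hc), List.append_assoc]
        · by_cases hx : VG nr nc g x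
          · have hxM : VG nr nc (setCell g c.1 c.2) x := (VG_mark nr nc g c x hc hxc).mpr hx
            have hcM : VG nr nc (setCell g x.1 x.2) c :=
              (VG_mark nr nc g x c hx (Ne.symm hxc)).mpr hc
            have hones_x : onesG (setCell (setCell g c.1 c.2) x.1 x.2) <
                onesG (setCell g c.1 c.2) :=
              ones_setCell_lt _ _ _ hxM.1 hxM.2.2.1 hxM.2.2.2.2
            have hones_x2 : onesG (setCell g x.1 x.2) < onesG g :=
              ones_setCell_lt _ _ _ hx.1 hx.2.2.1 hx.2.2.2.2
            have hones_cM : onesG (setCell (setCell g x.1 x.2) c.1 c.2) <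
                onesG (setCell g x.1 x.2) :=
              ones_setCell_lt _ _ _ hcM.1 hcM.2.2.1 hcM.2.2.2.2
            rw [fillB_cons, if_pos hxM]
            rw [List.cons_append, fillB_cons, if_pos hx,
                IH1 (m - 1) (by omega) _ _ (nbsL x) c (t ++ l2)
                  (by simp only [List.length_append, List.length_cons, nbsL_length]; omega),
                fillB_cons, if_pos hcM]
            rw [setCell_comm g c x hc.1 hc.2.2.1 hc.2.2.2.2 hx.1 hx.2.2.1 hx.2.2.2.2
                  (Ne.symm hxc)]
            have hperm : (nbsL x ++ (nbsL c ++ t ++ l2)).Perm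
                (nbsL c ++ (nbsL x ++ (t ++ l2))) := by
              have h1 : nbsL x ++ (nbsL c ++ t ++ l2) =
                  (nbsL x ++ nbsL c) ++ (t ++ l2) := by simp [List.append_assoc]
              have h2 : nbsL c ++ (nbsL x ++ (t ++ l2)) =
                  (nbsL c ++ nbsL x) ++ (t ++ l2) := by simp [List.append_assoc]
              rw [h1, h2]
              exact (List.perm_append_comm).append_right _
            exact IH2 (m - 1) (by omega) _ _ _ _ hperm
              (by simp only [List.length_append, nbsL_length]; omega)
          · have hxM : ¬ VG nr nc (setCell g c.1 c.2) x :=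
              fun h => hx ((VG_mark nr nc g c x hc hxc).mp h)
            rw [fillB_cons, if_neg hxM]
            rw [List.cons_append, fillB_cons, if_neg hx, fillB_cons,
                if_pos hc, List.append_assoc]
      · rw [List.cons_append, fillB_cons, if_neg hc,
            IH1 (m - 1) (by omega) _ _ _ _ _
              (by simp only [List.length_append, List.length_cons]; omega)]
        by_cases hx : VG nr nc g x
        · have hcx : c ≠ x := fun h => hc (h ▸ hx)
          have hones_x : onesG (setCell g x.1 x.2) < onesG g :=
            ones_setCell_lt _ _ _ hx.1 hx.2.2.1 hx.2.2.2.2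
          have hcM : ¬ VG nr nc (setCell g x.1 x.2) c :=
            fun h => hc ((VG_mark nr nc g x c hx hcx).mp h)
          rw [fillB_cons, if_pos hx]
          rw [List.cons_append, fillB_cons, if_pos hx,
              IH1 (m - 1) (by omega) _ _ (nbsL x) c (t ++ l2)
                (by simp only [List.length_append, List.length_cons, nbsL_length]; omega),
              fillB_cons, if_neg hcM]
        · rw [fillB_cons, if_neg hx, List.cons_append, fillB_cons, if_neg hx,
              fillB_cons, if_neg hc]
  refine ⟨hBTF, ?_⟩
  intro g n l l' hp hm
  cases l' with
  | nil =>
    have : l = [] := hp.eq_nil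
    subst this; rfl
  | cons y t' =>
    have hy : y ∈ l := hp.mem_iff.mpr (by simp)
    obtain ⟨s1, s2, rfl⟩ := List.append_of_mem hy
    simp only [List.length_append, List.length_cons] at hm
    rw [hBTF g n s1 y s2 (by simp only [List.length_append, List.length_cons]; omega)]
    have hpm : (s1 ++ s2).Perm t' := ((List.perm_middle).symm.trans hp).cons_inv
    rw [fillB_cons, fillB_cons]
    by_cases hv : VG nr nc g y
    · have hones : onesG (setCell g y.1 y.2) < onesG g :=
        ones_setCell_lt _ _ _ hv.1 hv.2.2.1 hv.2.2.2.2
      rw [if_pos hv, if_pos hv]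
      apply IH2 (m - 1) (by omega) _ _ _ _ (hpm.append_left (nbsL y))
      simp only [List.length_append, nbsL_length]; omega
    · rw [if_neg hv, if_neg hv]
      apply IH2 (m - 1) (by omega) _ _ _ _ hpm
      simp only [List.length_append]; omega

theorem fill_perm (nr nc : Int) (g : List (List Int)) (n : Int)
    {l l' : List (Int × Int)} (h : l.Perm l') :
    fillB nr nc g n l = fillB nr nc g n l' :=
  (fill_main nr nc (5 * onesG g + l.length)).2 g n l l' h le_rfl

-- ===== BFS = worklist fill =====
theorem foldrel (nr nc : Int) : ∀ (ns : List (Int × Int)) (g : List (List Int))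
    (d : List (Int × Int)) (cnt : Int) (tail : List (Int × Int)),
    fillB nr nc g cnt (ns ++ tail ++ d.flatMap nbsL) =
      fillB nr nc (List.foldl (bfsStep nr nc) (g, d, cnt) ns).1
        (List.foldl (bfsStep nr nc) (g, d, cnt) ns).2.2
        (tail ++ (List.foldl (bfsStep nr nc) (g, d, cnt) ns).2.1.flatMap nbsL) := by
  intro ns
  induction ns with
  | nil => intro g d cnt tail; simp
  | cons c ns ih =>
    intro g d cnt tail
    simp only [List.cons_append, List.foldl_cons, bfsStep_eq]
    rw [fillB_cons]
    by_cases hvc : VG nr nc g c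
    · rw [if_pos hvc, if_pos hvc]
      have hperm : (nbsL c ++ (ns ++ tail ++ d.flatMap nbsL)).Perm
          ((ns ++ tail ++ d.flatMap nbsL) ++ nbsL c) := List.perm_append_comm
      rw [fill_perm nr nc _ _ hperm]
      have h3 : (ns ++ tail ++ List.flatMap nbsL d) ++ nbsL c =
          ns ++ tail ++ List.flatMap nbsL (d ++ [c]) := by
        rw [List.flatMap_append, List.flatMap_cons, List.flatMap_nil, List.append_nil,
            List.append_assoc]
      rw [h3]
      exact ih (setCell g c.1 c.2) (d ++ [c]) (cnt + 1) tail
    · rw [if_neg hvc, if_neg hvc]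
      exact ih g d cnt tail

theorem bfs_eq_fill (nr nc : Int) : ∀ (m : Nat) (g : List (List Int))
    (q : List (Int × Int)) (cnt : Int), 5 * onesG g + q.length ≤ m →
    bfsLoop nr nc g q cnt = fillB nr nc g cnt (q.flatMap nbsL) := by
  intro m
  induction m using Nat.strong_induction_on with
  | _ m IH =>
  intro g q cnt hm
  cases q with
  | nil => simp [bfsLoop, fillB]
  | cons c rest =>
    obtain ⟨i, j⟩ := c
    simp only [List.length_cons] at hm
    have hfold := bfsFold_le nr nc [(i - 1, j), (i, j - 1), (i + 1, j), (i, j + 1)] g rest cnt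
    rw [bfsLoop]
    rw [IH (m - 1) (by omega) _ _ _ (by omega)]
    have hfr := foldrel nr nc [(i - 1, j), (i, j - 1), (i + 1, j), (i, j + 1)] g rest cnt []
    simp only [List.append_nil, List.nil_append] at hfr
    simp only [List.flatMap_cons, nbsL]
    exact hfr.symm

-- ===== worklist fill = DFS recursion =====
-- splitting the worklist: finish l1 first, then l2 from the resulting grid/count
theorem fillB_split (nr nc : Int) : ∀ (m : Nat) (g : List (List Int)) (n : Int)
    (l1 l2 : List (Int × Int)), 5 * onesG g + l1.length ≤ m →
    fillB nr nc g n (l1 ++ l2) =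
      fillB nr nc (fillB nr nc g n l1).1 (fillB nr nc g n l1).2 l2 := by
  intro m
  induction m using Nat.strong_induction_on with
  | _ m IH =>
  intro g n l1 l2 hm
  cases l1 with
  | nil => simp [fillB]
  | cons c rest =>
    simp only [List.length_cons] at hm
    rw [List.cons_append, fillB_cons, fillB_cons]
    by_cases hv : VG nr nc g c
    · have hones : onesG (setCell g c.1 c.2) < onesG g :=
        ones_setCell_lt _ _ _ hv.1 hv.2.2.1 hv.2.2.2.2
      rw [if_pos hv, if_pos hv, ← List.append_assoc]
      exact IH (m - 1) (by omega) _ _ _ _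
        (by simp only [List.length_append, nbsL_length]; omega)
    · rw [if_neg hv, if_neg hv]
      exact IH (m - 1) (by omega) _ _ _ _ (by omega)

-- the worklist fill over `todo` computes exactly the grid and total area of B's
-- recursive neighbour walk (count threaded additively)
theorem fill_eq_dfs (nr nc : Int) : ∀ (m : Nat) (g : List (List Int)) (n : Int)
    (todo : List (Int × Int)), 5 * onesG g + todo.length ≤ m →
    fillB nr nc g n todo =
      ((dfsS nr nc g todo).val.1, n + (dfsS nr nc g todo).val.2) := by
  intro m
  induction m using Nat.strong_induction_on with
  | _ m IH =>
  intro g n todo hm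
  cases todo with
  | nil => simp [fillB, dfsS]
  | cons c rest =>
    simp only [List.length_cons] at hm
    rw [fillB_cons, dfsS_cons]
    by_cases hv : VG nr nc g c
    · have hones : onesG (setCell g c.1 c.2) < onesG g :=
        ones_setCell_lt _ _ _ hv.1 hv.2.2.1 hv.2.2.2.2
      rw [if_pos hv, if_pos hv]
      rcases hX : dfsS nr nc (setCell g c.1 c.2) (nbsL c) with ⟨⟨gp, np⟩, hp0⟩
      have hp : onesG gp ≤ onesG (setCell g c.1 c.2) := hp0
      rw [fillB_split nr nc (5 * onesG (setCell g c.1 c.2) + 4) _ _ _ _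
            (by simp [nbsL_length])]
      have e1 := IH (m - 1) (by omega) (setCell g c.1 c.2) (n + 1) (nbsL c)
            (by simp only [nbsL_length]; omega)
      rw [hX] at e1
      rw [e1]
      show fillB nr nc gp (n + 1 + np) rest = _
      rw [IH (m - 1) (by omega) gp (n + 1 + np) rest (by omega)]
      refine Prod.ext rfl ?_
      show (n + 1 + np) + (dfsS nr nc gp rest).val.2 =
        n + ((1 + np) + (dfsS nr nc gp rest).val.2)
      ring
    · rw [if_neg hv, if_neg hv]
      exact IH (m - 1) (by omega) g n rest (by omega)

-- ===== outer double loop =====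
theorem inner_eq (nr nc i : Int) :
    (fun (st : List (List Int) × Int) (j : Int) =>
        if cellAt st.1 i j = 1 then
          let g1 := setCell st.1 i j
          let p := bfsLoop nr nc g1 [(i, j)] 1
          (p.1, max st.2 p.2)
        else st) =
    (fun (st : List (List Int) × Int) (j : Int) =>
        if cellAt st.1 i j = 1 then
          let p := dfsS nr nc (setCell st.1 i j) (nbsL (i, j))
          (p.val.1, max st.2 (1 + p.val.2))
        else st) := by
  funext st j
  by_cases h : cellAt st.1 i j = 1
  · simp only [if_pos h]
    have hpq : bfsLoop nr nc (setCell st.1 i j) [(i, j)] 1 =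
        fillB nr nc (setCell st.1 i j) 1 (nbsL (i, j)) := by
      rw [bfs_eq_fill nr nc (5 * onesG (setCell st.1 i j) + 1) _ _ _ (by simp)]
      simp [nbsL]
    rw [hpq, fill_eq_dfs nr nc (5 * onesG (setCell st.1 i j) + (nbsL (i, j)).length) _ _ _
          le_rfl]
  · simp only [if_neg h]

theorem ports_eq (grid : List (List Int)) : bfs_approach_py grid = bfs_approach_py_alt grid := by
  unfold bfs_approach_py bfs_approach_py_alt
  simp only [inner_eq]

-- ===== VERDICT (by name: the statement is the Claim_ definition above) =====
theorem bfs_approach_py_spec : Claim_equal_bfs_approach_py := by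
  intro grid _ _
  unfold Spec_bfs_approach_py
  exact ports_eq grid
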